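-- pv_equiv track=rewrite | github.com/mishmishb/PasswordWebsite | Python_files/calculate_guesses.py | bruteforce_guesses
-- ===== SOURCE A (Python) =====
-- def bruteforce_guesses(section):
--     ''' Works out which sets are involved in the word and performs an
--     entropy calculation based on
--     https://www.pleacher.com/mp/mlessons/algebra/entropy.html
--     The entropy step is skipped as we just need the number of guesses.
--     '''
--
--     low_alpha = False
--     upper_alpha = False
--     number = False
--     symbol = False
--     potential_symbols = r'!"£$€%^&*()-_=;:+[]{}#~\'@/?.>,<|`¬'
--     set_size = 0
--
--     input_string = section['input']
--
--     # Checks what character sets are in the string.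
--     for character in input_string:
--         if (character.islower() and low_alpha is False):
--             set_size += 26
--             low_alpha = True
--         elif (character.isupper() and upper_alpha is False):
--             set_size += 26
--             upper_alpha = True
--         elif (character.isdecimal() and number is False):
--             set_size += 10
--             number = True
--         elif(character in potential_symbols and symbol is False):
--             set_size += 35
--             symbol = True
--
--     # See function doc string.
--     brute_guess = round((set_size ** len(input_string)) / 2)
--
--
--     space = []
--     if low_alpha is True:
--         space.append('lowercase')
--     if upper_alpha is True:
--         space.append('uppercase')
--     if number is True:
--         space.append('number')
--     if symbol is True:
--         space.append('symbol')
--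
--     section['character_space'] = space
--
--     return brute_guess
-- ===== SOURCE B (Python) =====
-- def bruteforce_guesses(section):
--     '''Same guess count, computed from four independent character-class
--     scans instead of one flag-guarded accumulating loop.'''
--     potential_symbols = r'!"£$€%^&*()-_=;:+[]{}#~\'@/?.>,<|`¬'
--     s = section['input']
--     low = any(c.islower() for c in s)
--     upper = any(c.isupper() for c in s)
--     number = any(c.isdecimal() for c in s)
--     symbol = any(c in potential_symbols for c in s)
--     set_size = 26 * low + 26 * upper + 10 * number + 35 * symbol
--     space = [name for flag, name in ((low, 'lowercase'), (upper, 'uppercase'),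
--                                      (number, 'number'), (symbol, 'symbol')) if flag]
--     section['character_space'] = space
--     return round(set_size ** len(s) / 2)
-- ===== Notes on version B (the rewrite author's own statement) =====
-- stated objective: simpler
-- what changed: The single flag-guarded accumulating loop is replaced by four independent any()-scans (one per character class, the classes being mutually exclusive), from which set_size and the character_space list are computed directly.
import Mathlib
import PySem

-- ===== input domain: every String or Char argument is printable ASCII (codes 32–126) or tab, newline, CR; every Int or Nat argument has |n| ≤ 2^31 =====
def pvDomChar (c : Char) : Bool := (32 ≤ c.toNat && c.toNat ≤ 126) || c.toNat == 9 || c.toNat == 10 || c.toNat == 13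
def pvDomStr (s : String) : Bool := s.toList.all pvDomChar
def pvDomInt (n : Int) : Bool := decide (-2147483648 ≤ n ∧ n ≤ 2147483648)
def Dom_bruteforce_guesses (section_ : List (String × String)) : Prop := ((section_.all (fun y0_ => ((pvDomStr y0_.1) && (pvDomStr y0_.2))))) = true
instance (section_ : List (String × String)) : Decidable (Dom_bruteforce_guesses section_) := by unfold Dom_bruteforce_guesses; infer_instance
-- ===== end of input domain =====

-- B replaces A's single flag-guarded accumulating loop by four independent per-class
-- scans (simpler decomposition); the proved equivalence is about the RETURN VALUE only
-- (both Pythons also store the same 'character_space' list into the argument dict).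

-- the Python literal r'!"£$€%^&*()-_=;:+[]{}#~\'@/?.>,<|`¬' (raw string: backslash and quote both kept)
def pvSyms : List Char :=
  ['!', '"', '£', '$', '€', '%', '^', '&', '*', '(', ')', '-', '_', '=', ';', ':', '+',
   '[', ']', '{', '}', '#', '~', '\\', '\'', '@', '/', '?', '.', '>', ',', '<', '|', '`', '¬']

-- exact model of Python's round(k / 2) for a nonnegative int k with k < 2^1025 - 2^971
-- (CPython: k/2 is the nearest-even double to k/2, then round() ties-to-even to an int);
-- used by both ports since both Pythons call round(set_size ** len(s) / 2).
def pvRoundHalf (k : Nat) : Nat :=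
  let f : Nat :=
    if k < 2 ^ 54 then k
    else
      let shift := PySem.Int.bitLength (k : Int) - 53
      let q := k / 2 ^ shift
      let r := k % 2 ^ shift
      let h := 2 ^ (shift - 1)
      (if h < r ∨ (r = h ∧ q % 2 = 1) then q + 1 else q) * 2 ^ shift
  if f % 2 = 0 then f / 2 else f / 2 + (f / 2) % 2

-- ===== PORT A =====
-- A's loop, one step per character (the if/elif chain, in order).
def pvStepA (st : Bool × Bool × Bool × Bool × Nat) (c : Char) : Bool × Bool × Bool × Bool × Nat :=
  match st with
  | (low, up, num, sym, sz) =>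
    if PySem.Chars.islower c && !low then (true, up, num, sym, sz + 26)
    else if PySem.Chars.isupper c && !up then (low, true, num, sym, sz + 26)
    -- isdecimal = isdigit on the ASCII domain of Dom_
    else if PySem.Chars.isdigit c && !num then (low, up, true, sym, sz + 10)
    else if PySem.Chars.isIn [c] pvSyms && !sym then (low, up, num, true, sz + 35)
    else (low, up, num, sym, sz)

def bruteforce_guesses (section_ : List (String × String)) : Int :=
  match List.lookup "input" section_ with
  | none => 0          -- unreachable under Pre_ (Python raises KeyError here)
  | some input_string =>
    let st := input_string.toList.foldl pvStepA (false, false, false, false, 0)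
    ((pvRoundHalf (st.2.2.2.2 ^ input_string.toList.length) : Nat) : Int)

-- ===== PORT B =====
def bruteforce_guesses_alt (section_ : List (String × String)) : Int :=
  match List.lookup "input" section_ with
  | none => 0          -- unreachable under Pre_ (Python raises KeyError here)
  | some s =>
    let cs := s.toList
    let low := cs.any PySem.Chars.islower
    let upper := cs.any PySem.Chars.isupper
    let number := cs.any PySem.Chars.isdigit      -- isdecimal = isdigit on ASCII
    let symbol := cs.any (fun c => PySem.Chars.isIn [c] pvSyms)
    let set_size := 26 * low.toNat + 26 * upper.toNat + 10 * number.toNat + 35 * symbol.toNat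
    ((pvRoundHalf (set_size ^ cs.length) : Nat) : Int)

-- ===== PRECONDITION & SPEC =====
-- closed-form character-set size of a string (for the overflow bound below)
def pvSetSize (cs : List Char) : Nat :=
  26 * (cs.any PySem.Chars.islower).toNat + 26 * (cs.any PySem.Chars.isupper).toNat +
  10 * (cs.any PySem.Chars.isdigit).toNat + 35 * (cs.any (fun c => decide (c ∈ pvSyms))).toNat

-- the least k for which Python's k/2 overflows a float: 2^1025 - 2^971, written as a
-- decimal literal so that 'decide' can evaluate Pre_ without deep Nat.pow recursion
def pvOverflowBound : Nat := 359538626972463161587457942810606830159868265420075653872347557960889936585529501893298035955174414192660572833385775821893111095703880805261314977343011641363817804001416767352547709691635423063528951460540139711142733919245685829639721669872950585438148336888731021408685423119399016186085760355808348995584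

-- Pre_ excludes exactly the inputs on which A raises: KeyError when the key 'input' is
-- absent, and OverflowError when set_size ** len(s) / 2 overflows a float
-- (i.e. set_size ^ len ≥ 2^1025 - 2^971); on every other input A returns normally.
def Pre_bruteforce_guesses (section_ : List (String × String)) : Prop :=
  (List.lookup "input" section_).isSome = true ∧
  pvSetSize ((List.lookup "input" section_).getD "").toList ^
    ((List.lookup "input" section_).getD "").toList.length < pvOverflowBound
instance (section_ : List (String × String)) : Decidable (Pre_bruteforce_guesses section_) := by
  unfold Pre_bruteforce_guesses; infer_instance

def pvWitness_bruteforce_guesses : (List (String × String)) := [("input", "aB3!")]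

def Spec_bruteforce_guesses (section_ : List (String × String)) (out : Int) : Prop := out = bruteforce_guesses_alt section_
instance (section_ : List (String × String)) (out : Int) : Decidable (Spec_bruteforce_guesses section_ out) := by unfold Spec_bruteforce_guesses; infer_instance

-- ===== CLAIM (what is proved, stated in full; the proofs are below) =====
def Claim_equal_bruteforce_guesses : Prop := ∀ (section_ : List (String × String)), Dom_bruteforce_guesses section_ → Pre_bruteforce_guesses section_ → Spec_bruteforce_guesses section_ (bruteforce_guesses section_)

-- ===== LEMMAS AND PROOFS =====

-- single-character membership test 'c in potential_symbols' is list membership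
lemma isIn_singleton (c : Char) (l : List Char) :
    PySem.Chars.isIn [c] l = decide (c ∈ l) := by
  rcases h : decide (c ∈ l) with _ | _ <;>
    simp only [decide_eq_false_iff_not, decide_eq_true_eq] at h
  · simp [PySem.Chars.isIn_eq_false_iff, List.singleton_infix_iff, h]
  · simp [PySem.Chars.isIn_iff_infix, List.singleton_infix_iff, h]

-- no symbol character is a lower/upper letter or a digit
lemma sym_not_alnum : ∀ d ∈ pvSyms, PySem.Chars.islower d = false ∧
    PySem.Chars.isupper d = false ∧ PySem.Chars.isdigit d = false := by
  intro d hd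
  have h : pvSyms.all
      (fun d => !PySem.Chars.islower d && !PySem.Chars.isupper d && !PySem.Chars.isdigit d)
      = true := by decide
  have := List.all_eq_true.mp h d hd
  simp only [Bool.and_eq_true, Bool.not_eq_true'] at this
  exact ⟨this.1.1, this.1.2, this.2⟩

-- the four character classes are pairwise disjoint
lemma lower_disj (c : Char) (h : PySem.Chars.islower c = true) :
    PySem.Chars.isupper c = false ∧ PySem.Chars.isdigit c = false ∧ c ∉ pvSyms := by
  refine ⟨?_, ?_, fun hm => by simp [(sym_not_alnum c hm).1] at h⟩ <;>
  · simp only [PySem.Chars.islower, Bool.and_eq_true, decide_eq_true_eq] at h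
    simp only [PySem.Chars.isupper, PySem.Chars.isdigit, Bool.and_eq_false_iff,
      decide_eq_false_iff_not]
    right
    intro hc
    exact absurd (Char.le_def.mp (le_trans h.1 hc)) (by decide)

lemma upper_disj (c : Char) (h : PySem.Chars.isupper c = true) :
    PySem.Chars.isdigit c = false ∧ c ∉ pvSyms := by
  refine ⟨?_, fun hm => by simp [(sym_not_alnum c hm).2.1] at h⟩
  simp only [PySem.Chars.isupper, Bool.and_eq_true, decide_eq_true_eq] at h
  simp only [PySem.Chars.isdigit, Bool.and_eq_false_iff, decide_eq_false_iff_not]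
  right
  intro hc
  exact absurd (Char.le_def.mp (le_trans h.1 hc)) (by decide)

lemma digit_disj (c : Char) (h : PySem.Chars.isdigit c = true) : c ∉ pvSyms :=
  fun hm => by simp [(sym_not_alnum c hm).2.2] at h

-- A's loop computes the four 'seen this class' flags and the linear size combination
lemma loopA_eq (cs : List Char) (low up num sym : Bool) (sz : Nat) :
    cs.foldl pvStepA (low, up, num, sym, sz) =
      (low || cs.any PySem.Chars.islower,
       up || cs.any PySem.Chars.isupper,
       num || cs.any PySem.Chars.isdigit,
       sym || cs.any (fun c => decide (c ∈ pvSyms)),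
       sz + 26 * (!low && cs.any PySem.Chars.islower).toNat
          + 26 * (!up && cs.any PySem.Chars.isupper).toNat
          + 10 * (!num && cs.any PySem.Chars.isdigit).toNat
          + 35 * (!sym && cs.any (fun c => decide (c ∈ pvSyms))).toNat) := by
  induction cs generalizing low up num sym sz with
  | nil => simp
  | cons c cs ih =>
    simp only [List.foldl_cons, List.any_cons, pvStepA, isIn_singleton]
    by_cases h1 : PySem.Chars.islower c
    · obtain ⟨h2, h3, h4⟩ := lower_disj c h1
      rcases low with _ | _ <;> simp [h1, h2, h3, h4, ih, Bool.toNat]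
    · by_cases h2 : PySem.Chars.isupper c
      · obtain ⟨h3, h4⟩ := upper_disj c h2
        rcases up with _ | _ <;>
          simp [h1, h2, h3, h4, ih, Bool.toNat] <;> cases cs.any PySem.Chars.isupper <;> omega
      · by_cases h3 : PySem.Chars.isdigit c
        · have h4 := digit_disj c h3
          rcases num with _ | _ <;>
            simp [h1, h2, h3, h4, ih, Bool.toNat] <;> cases cs.any PySem.Chars.isdigit <;> omega
        · by_cases h4 : c ∈ pvSyms
          · rcases sym with _ | _ <;>
              simp [h1, h2, h3, h4, ih, Bool.toNat] <;>
              cases cs.any (fun c => decide (c ∈ pvSyms)) <;> omega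
          · simp [h1, h2, h3, h4, ih]

-- ===== VERDICT (by name: the statement is the Claim_ definition above) =====
theorem bruteforce_guesses_spec : Claim_equal_bruteforce_guesses := by
  intro section_ _ _
  unfold Spec_bruteforce_guesses bruteforce_guesses bruteforce_guesses_alt
  cases h : List.lookup "input" section_ with
  | none => rfl
  | some s =>
    simp only [loopA_eq, isIn_singleton]
    norm_num [Bool.toNat]
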